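-- pv_equiv track=rewrite | github.com/SnaKey0u0/2022Data-Mining | Hw1/fp_tree.py | first_scan
-- ===== SOURCE A (Python) =====
-- def first_scan(dataset):
--     weights = dict()
--     for transaction in dataset:
--         for item in transaction:
--             if weights.get(item):
--                 weights[item] += 1
--             else:
--                 weights[item] = 1
--     return weights
-- ===== SOURCE B (Python) =====
-- def first_scan(dataset):
--     items = [item for transaction in dataset for item in transaction]
--     counts = {}
--     prev = None
--     run = 0
--     for x in sorted(items):
--         if x == prev:
--             run += 1
--         else:
--             if prev is not None:
--                 counts[prev] = run
--             prev = x
--             run = 1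
--     if prev is not None:
--         counts[prev] = run
--     return {x: counts[x] for x in dict.fromkeys(items)}
-- ===== Notes on version B (the rewrite author's own statement) =====
-- stated objective: alternative
-- what changed: Replaced A's incremental per-item dict updating by sort-based counting: flatten, sort, accumulate run lengths of equal adjacent items into a dict, then restore first-occurrence key order with a comprehension over the ordered distinct items.
import Mathlib
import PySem

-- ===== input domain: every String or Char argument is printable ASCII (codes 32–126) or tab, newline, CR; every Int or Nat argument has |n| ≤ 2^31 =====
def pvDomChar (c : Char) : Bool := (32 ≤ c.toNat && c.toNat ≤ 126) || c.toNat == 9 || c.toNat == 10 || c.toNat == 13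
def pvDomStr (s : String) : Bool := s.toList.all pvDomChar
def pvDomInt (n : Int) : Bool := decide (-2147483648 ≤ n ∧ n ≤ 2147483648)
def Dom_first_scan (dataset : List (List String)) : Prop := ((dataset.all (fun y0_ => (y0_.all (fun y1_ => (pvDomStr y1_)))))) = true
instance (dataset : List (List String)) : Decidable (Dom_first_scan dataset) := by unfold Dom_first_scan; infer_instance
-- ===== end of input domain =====

-- ===== PORT A =====
-- B replaces A's incremental per-item dict updates by sort-based run-length counting plus an order-restoring comprehension (alternative algorithm, same result).
def first_scan (dataset : List (List String)) : List (String × Int) :=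
  (dataset.foldl (fun weights transaction =>
      transaction.foldl (fun weights item =>
        match weights.get? item with
        | some v => if v ≠ 0 then weights.insert item (v + 1) else weights.insert item 1
        | none => weights.insert item 1) weights)
    PySem.Dict.empty).items

-- ===== PORT B =====
-- one for-loop step of B: state (counts, prev, run); `x == prev` is False when prev is None
def stepB (st : PySem.Dict String Int × Option String × Int) (x : String) :
    PySem.Dict String Int × Option String × Int :=
  match st with
  | (counts, some p, run) =>
      if x = p then (counts, some p, run + 1) else (counts.insert p run, some x, 1)
  | (counts, none, _) => (counts, some x, 1)

-- the trailing `if prev is not None: counts[prev] = run`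
def flushB (st : PySem.Dict String Int × Option String × Int) : PySem.Dict String Int :=
  match st with
  | (counts, some p, run) => counts.insert p run
  | (counts, none, _) => counts

def first_scan_alt (dataset : List (List String)) : List (String × Int) :=
  let items := dataset.flatMap (fun transaction => transaction)
  let counts :=
    flushB ((PySem.List.sorted items (fun x => x) false).foldl stepB
      (PySem.Dict.empty, none, 0))
  -- counts[x]: every x in dedup items is a key of counts, so the 0 default is never used
  (PySem.List.dedup items).map (fun x => (x, counts.getD x 0))

-- ===== PRECONDITION & SPEC =====
def Spec_first_scan (dataset : List (List String)) (out : List (String × Int)) : Prop := out = first_scan_alt dataset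
instance (dataset : List (List String)) (out : List (String × Int)) : Decidable (Spec_first_scan dataset out) := by unfold Spec_first_scan; infer_instance

-- ===== CLAIM (what is proved, stated in full; the proofs are below) =====
def Claim_equal_first_scan : Prop := ∀ (dataset : List (List String)), Dom_first_scan dataset → Spec_first_scan dataset (first_scan dataset)

-- ===== LEMMAS AND PROOFS =====

-- ===== VERDICT (by name: the statement is the Claim_ definition above) =====
lemma stepA_eq (d : PySem.Dict String Int) (x : String) :
    (match d.get? x with
     | some v => if v ≠ 0 then d.insert x (v + 1) else d.insert x 1
     | none => d.insert x 1) = d.insert x (d.getD x 0 + 1) := by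
  rcases h : d.get? x with _ | v <;>
    simp [PySem.Dict.getD_eq_get?_getD, h]
  by_cases hv : v = 0 <;> simp [hv]

lemma foldl_nested (dataset : List (List String)) (d : PySem.Dict String Int)
    (f : PySem.Dict String Int → String → PySem.Dict String Int) :
    dataset.foldl (fun w t => t.foldl f w) d
      = (dataset.flatMap (fun t => t)).foldl f d := by
  induction dataset generalizing d with
  | nil => rfl
  | cons t ts ih => simp [List.foldl_append, ih]

-- run-length loop invariant: on a sorted tail s whose elements all dominate p,
-- the flushed dict looks up as run+count for p, count for members of s, and is untouched elsewhere
lemma run_getD (s : List String) (counts : PySem.Dict String Int) (p : String)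
    (run : Int) (x : String) (hs : s.Pairwise (· ≤ ·)) (hp : ∀ y ∈ s, p ≤ y) :
    (flushB (s.foldl stepB (counts, some p, run))).getD x 0
      = if x = p then run + s.count p
        else if x ∈ s then (s.count x : Int)
        else counts.getD x 0 := by
  induction s generalizing counts p run with
  | nil => simp [flushB, PySem.Dict.getD_insert]
  | cons y s' ih =>
      have hpy : p ≤ y := hp y (by simp)
      have hs' : s'.Pairwise (· ≤ ·) := hs.of_cons
      have hp' : ∀ z ∈ s', y ≤ z := fun z hz => (List.pairwise_cons.mp hs).1 z hz
      by_cases hyp : y = p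
      · subst hyp
        rw [List.foldl_cons, show stepB (counts, some y, run) y = (counts, some y, run + 1) by
              simp [stepB], ih counts y (run + 1) hs' hp']
        by_cases hxy : x = y
        · subst hxy
          simp [List.count_cons_self]
          ring
        · have hc : List.count x (y :: s') = List.count x s' := by
            rw [List.count_cons]; simp [Ne.symm hxy]
          simp [hxy, hc]
      · have hlt : p < y := lt_of_le_of_ne hpy (fun h => hyp h.symm)
        rw [List.foldl_cons, show stepB (counts, some p, run) y = (counts.insert p run, some y, 1) by
              simp [stepB, hyp], ih (counts.insert p run) y 1 hs' hp']
        have hpns' : p ∉ s' := fun h => absurd (hp' p h) (not_le.mpr hlt)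
        have hpny : ¬ p = y := fun h => hyp h.symm
        by_cases hxp : x = p
        · subst hxp
          have hc : List.count x (y :: s') = 0 := List.count_eq_zero.mpr (by simp [hpny, hpns'])
          simp [hpny, hpns', hc, PySem.Dict.getD_insert_self]
        · by_cases hxy : x = y
          · subst hxy
            simp [hxp, List.count_cons_self]
            ring
          · have hc : List.count x (y :: s') = List.count x s' := by
              rw [List.count_cons]; simp [Ne.symm hxy]
            simp [hxy, hxp, hc, PySem.Dict.getD_insert]

theorem first_scan_spec : Claim_equal_first_scan := by
  intro dataset _
  unfold Spec_first_scan first_scan first_scan_alt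
  have h1 : ∀ (d : PySem.Dict String Int),
      dataset.foldl (fun weights transaction =>
        transaction.foldl (fun weights item =>
          match weights.get? item with
          | some v => if v ≠ 0 then weights.insert item (v + 1) else weights.insert item 1
          | none => weights.insert item 1) weights) d
      = (dataset.flatMap (fun t => t)).foldl
          (fun d x => d.insert x (d.getD x 0 + 1)) d := by
    intro d
    rw [foldl_nested]
    have hf : (fun (w : PySem.Dict String Int) (item : String) =>
        match w.get? item with
        | some v => if v ≠ 0 then w.insert item (v + 1) else w.insert item 1
        | none => w.insert item 1)
        = fun d x => d.insert x (d.getD x 0 + 1) := by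
      funext d x; exact stepA_eq d x
    rw [hf]
  rw [h1, PySem.Dict.foldl_insert_getD_add_one_eq_counter, PySem.Dict.items_counter]
  set items := dataset.flatMap (fun t => t) with hitems
  rw [← PySem.List.dedup_eq_ofList]
  apply List.map_congr_left
  intro x hx
  have hxmem : x ∈ items := (PySem.List.mem_dedup _ _).mp hx
  set s := PySem.List.sorted items (fun x => x) false with hsdef
  have hperm : s.Perm items := PySem.List.sorted_perm items (fun x => x) false
  have hcnt : s.count x = items.count x := hperm.count_eq x
  have hxs : x ∈ s := hperm.mem_iff.mpr hxmem
  have hsorted : s.Pairwise (· ≤ ·) := PySem.List.sorted_pairwise items (fun x => x)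
  rcases hseq : s with _ | ⟨y, s'⟩
  · rw [hseq] at hxs; simp at hxs
  · rw [hseq] at hsorted hxs hcnt
    have hp' : ∀ z ∈ s', y ≤ z := fun z hz => (List.pairwise_cons.mp hsorted).1 z hz
    rw [List.foldl_cons, show stepB (PySem.Dict.empty, none, 0) y = (PySem.Dict.empty, some y, 1) by
          simp [stepB],
        run_getD s' PySem.Dict.empty y 1 x hsorted.of_cons hp']
    rw [← hcnt]
    by_cases hxy : x = y
    · subst hxy
      simp [List.count_cons_self]
      ring
    · have hxs' : x ∈ s' := by rcases List.mem_cons.mp hxs with h | h; exact absurd h hxy; exact h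
      have hc : List.count x (y :: s') = List.count x s' := by
        rw [List.count_cons]; simp [Ne.symm hxy]
      simp [hxy, hxs', hc]
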